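-- pv_equiv track=rewrite | github.com/MarkMoretto/python-examples-main | algorithms/sequences/ulam.py | sequence_gen
-- ===== SOURCE A (Python) =====
-- def sequence_gen(current_n: int, iterable: list):
--     sum_count: int = 0
--     current_pair: tuple
--     sum_count: int = 0
--     for i in iterable:
--         for j in iterable:
--             if i < j:
--                 current_pair = sorted((j, i))
--                 if sum(current_pair) == current_n:
--                     sum_count += 1
--     if sum_count == 1:
--         yield current_n
-- ===== SOURCE B (Python) =====
-- def sequence_gen(current_n: int, iterable: list):
--     pair_count = 0
--     seen = {}
--     for x in iterable:
--         if 2 * x != current_n: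
--             pair_count += seen.get(current_n - x, 0)
--         seen[x] = seen.get(x, 0) + 1
--     if pair_count == 1:
--         yield current_n
-- ===== Notes on version B (the rewrite author's own statement) =====
-- stated objective: faster
-- what changed: Replaced A's O(n^2) double scan over the list (counting ordered pairs i<j with i+j==current_n) by a single pass that keeps a dict of value frequencies seen so far and adds the count of the complement current_n-x (skipping the self-complement 2x==current_n).
import Mathlib
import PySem

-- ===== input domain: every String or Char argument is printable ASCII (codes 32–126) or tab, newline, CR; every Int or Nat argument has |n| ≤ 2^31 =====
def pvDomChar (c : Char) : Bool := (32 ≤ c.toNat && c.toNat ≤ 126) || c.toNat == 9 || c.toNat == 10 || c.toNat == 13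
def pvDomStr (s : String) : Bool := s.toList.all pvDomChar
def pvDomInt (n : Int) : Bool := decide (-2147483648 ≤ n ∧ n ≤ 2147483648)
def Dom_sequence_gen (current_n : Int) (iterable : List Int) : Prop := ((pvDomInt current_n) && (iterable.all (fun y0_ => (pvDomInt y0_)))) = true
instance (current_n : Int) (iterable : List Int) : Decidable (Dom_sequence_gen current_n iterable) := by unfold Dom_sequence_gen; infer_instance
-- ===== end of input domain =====

-- B replaces A's quadratic double scan by one pass with a running counter dict (alternative/faster algorithm); the generator's yields are modelled as the returned list.

-- ===== PORT A =====
def sequence_gen (current_n : Int) (iterable : List Int) : List Int :=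
  let sum_count : Int :=
    iterable.foldl (fun sc i =>
      iterable.foldl (fun sc j =>
        if i < j then
          let current_pair := PySem.List.sorted [j, i] (fun x => x) false
          if current_pair.sum = current_n then sc + 1 else sc
        else sc) sc) 0
  if sum_count = 1 then [current_n] else []

-- ===== PORT B =====
def sequence_gen_alt (current_n : Int) (iterable : List Int) : List Int :=
  let st : Int × PySem.Dict Int Int :=
    iterable.foldl (fun st x =>
      let c : Int := if 2 * x ≠ current_n then st.1 + st.2.getD (current_n - x) 0 else st.1
      (c, st.2.modify x 0 (· + 1))) (0, PySem.Dict.empty)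
  if st.1 = 1 then [current_n] else []

-- ===== PRECONDITION & SPEC =====
def Spec_sequence_gen (current_n : Int) (iterable : List Int) (out : List Int) : Prop := out = sequence_gen_alt current_n iterable
instance (current_n : Int) (iterable : List Int) (out : List Int) : Decidable (Spec_sequence_gen current_n iterable out) := by unfold Spec_sequence_gen; infer_instance

-- ===== CLAIM (what is proved, stated in full; the proofs are below) =====
def Claim_equal_sequence_gen : Prop := ∀ (current_n : Int) (iterable : List Int), Dom_sequence_gen current_n iterable → Spec_sequence_gen current_n iterable (sequence_gen current_n iterable)

-- ===== LEMMAS AND PROOFS =====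

-- sum of the sorted two-element pair is just the sum
theorem sum_sorted_pair (j i : Int) :
    (PySem.List.sorted [j, i] (fun x => x) false).sum = j + i := by
  have h := (PySem.List.sorted_perm (xs := [j, i]) (key := fun x => x) (rev := false)).sum_eq
  simpa using h

-- B's per-element increment
def incB (n x : Int) (t : List Int) : Int :=
  if 2 * x ≠ n then (t.count (n - x) : Int) else 0

-- reference count for B: prefix P already seen, remaining list L
def cB (n : Int) (P L : List Int) : Int :=
  match L with
  | [] => 0
  | x :: t => incB n x P + cB n (P ++ [x]) t

theorem cB_perm (n : Int) (L : List Int) : ∀ P P' : List Int, P.Perm P' → cB n P L = cB n P' L := by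
  induction L with
  | nil => intro P P' _; rfl
  | cons x t ih =>
    intro P P' h
    simp only [cB, incB, h.count_eq]
    rw [ih (P ++ [x]) (P' ++ [x]) (h.append_right [x])]

theorem cB_shift (n x : Int) (L : List Int) : ∀ P : List Int,
    cB n (P ++ [x]) L = cB n P L + incB n x L := by
  induction L with
  | nil => intro P; simp [cB, incB]
  | cons y t ih =>
    intro P
    simp only [cB]
    rw [cB_perm n t ((P ++ [x]) ++ [y]) ((P ++ [y]) ++ [x])
      (by simpa using (List.perm_append_comm (l₁ := [x]) (l₂ := [y])).append_left P),
      ih (P ++ [y])]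
    have hcnt : incB n y (P ++ [x]) = incB n y P + (if 2 * y ≠ n ∧ x = n - y then 1 else 0) := by
      simp only [incB, List.count_append, List.count_singleton]
      split_ifs with h1 h2 h2 <;> simp_all
    have hx : incB n x (y :: t) = incB n x t + (if 2 * x ≠ n ∧ y = n - x then 1 else 0) := by
      simp only [incB, List.count_cons]
      split_ifs with h1 h2 h2 <;> simp_all
    rw [hcnt, hx]
    have : (if 2 * y ≠ n ∧ x = n - y then (1:Int) else 0) = (if 2 * x ≠ n ∧ y = n - x then 1 else 0) := by
      split_ifs with h1 h2 <;> first | rfl | omega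
    omega

-- B's loop computes cB
theorem foldB (n : Int) (L : List Int) : ∀ (P : List Int) (c : Int),
    L.foldl (fun (st : Int × PySem.Dict Int Int) x =>
      let c : Int := if 2 * x ≠ n then st.1 + st.2.getD (n - x) 0 else st.1
      (c, st.2.modify x 0 (· + 1)))
      (c, PySem.Dict.counter P)
    = (c + cB n P L, PySem.Dict.counter (P ++ L)) := by
  induction L with
  | nil => intro P c; simp [cB]
  | cons x t ih =>
    intro P c
    have hmod : (PySem.Dict.counter P).modify x 0 (· + 1) = PySem.Dict.counter (P ++ [x]) := by
      rw [PySem.Dict.counter_eq_foldl, PySem.Dict.counter_eq_foldl, List.foldl_append]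
      rfl
    simp only [List.foldl_cons, hmod, PySem.Dict.getD_counter, ih]
    simp only [Prod.mk.injEq]
    refine ⟨?_, ?_⟩
    · simp only [cB, incB]; split_ifs <;> omega
    · rw [List.append_assoc]; rfl

-- A's inner loop
theorem innerA (n i : Int) (L : List Int) : ∀ s : Int,
    L.foldl (fun sc j =>
        if i < j then
          let current_pair := PySem.List.sorted [j, i] (fun x => x) false
          if current_pair.sum = n then sc + 1 else sc
        else sc) s
    = s + (L.countP (fun j => decide (i < j) && decide (j + i = n)) : Int) := by
  induction L with
  | nil => intro s; simp
  | cons j t ih =>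
    intro s
    rw [List.foldl_cons, ih]
    simp only [List.countP_cons, sum_sorted_pair]
    split_ifs <;> simp_all <;> omega

-- reference count for A
def fA (n : Int) (L : List Int) : Int :=
  (L.map (fun i => (L.countP (fun j => decide (i < j) && decide (j + i = n)) : Int))).sum

theorem two_counts (n x : Int) (t : List Int) :
    (t.countP (fun j => decide (x < j) && decide (j + x = n)) : Int)
      + (t.countP (fun i => decide (i < x) && decide (x + i = n)) : Int)
    = incB n x t := by
  induction t with
  | nil => simp [incB]
  | cons y s ih =>
    simp only [List.countP_cons, incB, List.count_cons] at *
    by_cases h : 2 * x ≠ n <;> simp [h] at ih ⊢ <;>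
      split_ifs <;> simp_all <;> omega

theorem sum_map_add' (t : List Int) (f g : Int → Int) :
    (t.map (fun i => f i + g i)).sum = (t.map f).sum + (t.map g).sum := by
  induction t with
  | nil => simp
  | cons a s ih => simp only [List.map_cons, List.sum_cons, ih]; ring

theorem sum_map_ite_one (t : List Int) (p : Int → Bool) :
    (t.map (fun i => if p i then (1 : Int) else 0)).sum = (t.countP p : Int) := by
  induction t with
  | nil => simp
  | cons a s ih => simp only [List.map_cons, List.sum_cons, List.countP_cons, ih]; split_ifs <;> simp [Int.add_comm]

theorem fA_cons (n x : Int) (t : List Int) :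
    fA n (x :: t) = fA n t + incB n x t := by
  simp only [fA, List.map_cons, List.sum_cons, List.countP_cons]
  have hcast : ∀ i : Int, ((t.countP (fun j => decide (i < j) && decide (j + i = n))
        + if decide (i < x) && decide (x + i = n) then 1 else 0 : Nat) : Int)
      = (t.countP (fun j => decide (i < j) && decide (j + i = n)) : Int)
        + (if decide (i < x) && decide (x + i = n) then (1 : Int) else 0) := by
    intro i; split_ifs <;> push_cast <;> ring
  simp only [hcast]
  rw [sum_map_add' t _ (fun i => if decide (i < x) && decide (x + i = n) then (1 : Int) else 0),
    sum_map_ite_one]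
  rw [← two_counts n x t]
  have hxx : (decide (x < x) && decide (x + x = n)) = false := by simp
  simp only [hxx, Bool.false_eq_true, if_false]
  ring

theorem fA_eq_cB (n : Int) (L : List Int) : fA n L = cB n [] L := by
  induction L with
  | nil => simp [fA, cB]
  | cons x t ih =>
    rw [fA_cons, ih]
    simp only [cB, incB]
    rw [cB_shift n x t []]
    simp [incB]

-- A's loop computes fA
theorem foldA (n : Int) (L : List Int) :
    L.foldl (fun sc i =>
      L.foldl (fun sc j =>
        if i < j then
          let current_pair := PySem.List.sorted [j, i] (fun x => x) false
          if current_pair.sum = n then sc + 1 else sc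
        else sc) sc) 0 = fA n L := by
  have h : ∀ (M : List Int) (s : Int),
      M.foldl (fun sc i =>
        L.foldl (fun sc j =>
          if i < j then
            let current_pair := PySem.List.sorted [j, i] (fun x => x) false
            if current_pair.sum = n then sc + 1 else sc
          else sc) sc) s
      = s + (M.map (fun i => (L.countP (fun j => decide (i < j) && decide (j + i = n)) : Int))).sum := by
    intro M
    induction M with
    | nil => intro s; simp
    | cons i t ih => intro s; simp only [List.foldl_cons, List.map_cons, List.sum_cons]; rw [innerA, ih]; ring
  rw [h]; simp [fA]

-- ===== VERDICT (by name: the statement is the Claim_ definition above) =====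
theorem sequence_gen_spec : Claim_equal_sequence_gen := by
  intro n L _
  unfold Spec_sequence_gen sequence_gen sequence_gen_alt
  have hB := foldB n L [] 0
  simp only [show PySem.Dict.counter ([] : List Int) = PySem.Dict.empty from rfl] at hB
  rw [hB, foldA, fA_eq_cB]
  simp
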